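-- pv_equiv track=rewrite | github.com/aditya-K93/cron-expression-parser | src/cron_expresion_parser.py | calculate_range_from_expression
-- ===== SOURCE A (Python) =====
-- from typing import Set, Tuple, List
--
-- def calculate_range_from_expression(range_expression_str: str, min_max_range: Tuple[int, int]) -> Set[int]:
--     """
--     return a set containing valid values for a given crontab range
--     'min_max_range' is a two element range iterable containing the
--     both-inclusive upper and lower limits of the crontab expression.
--     """
--     element = range_expression_str.strip()
--     # default offset assume to be in steps of 1 update later for cases like 5-10/2 where offset is 2
--     offset = 1
--     if element == '*':
--         return set(range(min_max_range[0], min_max_range[1] + 1))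
--     elif element.isdigit():
--         # check for bounds and return digit as set (handles cases where range is specified as (1,3))
--         value = int(element)
--         if min_max_range[0] <= value <= min_max_range[1]:
--             return {value}
--         else:
--             raise ValueError(f"{element} is not within valid range")
--     elif '-' in element or '/' in element:
--         divide = element.split('/')
--         subrange = divide[0]
--         if len(divide) == 2:
--             # given: 1-10/5 or */1 offset should be 5 and 1 respectively
--             offset = int(divide[1])
--
--         if '-' in subrange:
--             # given: 1-5
--             prefix, suffix = [int(n) for n in subrange.split('-')]
--             if prefix < min_max_range[0] or suffix > min_max_range[1]:
--                 raise ValueError(f"{element} is not within valid range.")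
--         elif subrange.isdigit():
--             # Handle offset increments e.g. 5/15 to run at :05, :20, :35, and :50
--             return set(range(int(subrange), min_max_range[1] + 1, offset))
--         elif subrange == '*':
--             # Include all values with the given range
--             prefix, suffix = min_max_range
--         else:
--             raise ValueError(f"Unrecognized symbol {subrange}")
--
--         if prefix < suffix:
--             # given: 5-7
--             return set(range(prefix, suffix + 1, offset))
--         else:
--             # case where suffix > prefix meaning circular range. i.e [(prefix,max), (min,suffix)]
--             # given: 11-5/3 and min_max_range=(1,14) = {11,14,3}
--             prefix_to_max = list(range(prefix, min_max_range[1] + 1))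
--             min_to_suffix = list(range(min_max_range[0], suffix + 1))
--             round_trip = prefix_to_max + min_to_suffix
--             return set(round_trip[::offset])
--     else:
--         raise ValueError(f"Element {element} not in a recognized format.")
-- ===== SOURCE B (Python) =====
-- def _descriptor(lo, hi, a, b):
--     """normalize a (possibly circular) bound pair to (start, head, tail)"""
--     if a < b:
--         return a, b + 1 - a, 0
--     return a, max(0, hi + 1 - a), max(0, b + 1 - lo)
--
--
-- def _parse(element, lo, hi):
--     """parse phase: expression -> numeric descriptor (start, head, tail, step)"""
--     if element == '*':
--         return lo, max(0, hi + 1 - lo), 0, 1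
--     if '-' not in element and '/' not in element:
--         raise ValueError(f"Element {element} not in a recognized format.")
--     parts = element.split('/')
--     step = int(parts[1]) if len(parts) == 2 else 1
--     sub = parts[0]
--     if sub.isdigit():
--         v = int(sub)
--         return v, max(0, hi + 1 - v), 0, step
--     if sub == '*':
--         a, b = lo, hi
--     elif '-' in sub:
--         a, b = (int(n) for n in sub.split('-'))
--         if a < lo or b > hi:
--             raise ValueError(f"{element} is not within valid range.")
--     else:
--         raise ValueError(f"Unrecognized symbol {sub}")
--     return _descriptor(lo, hi, a, b) + (step,)
--
--
-- def calculate_range_from_expression(range_expression_str, min_max_range):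
--     """parse to (start, head, tail, step), then generate the whole set with one
--     index-to-value formula (i -> start+i, wrapping to lo+(i-head) past head)"""
--     lo, hi = min_max_range
--     element = range_expression_str.strip()
--     if element.isdigit():
--         value = int(element)
--         if lo <= value <= hi:
--             return {value}
--         raise ValueError(f"{element} is not within valid range")
--     start, head, tail, step = _parse(element, lo, hi)
--     return {start + i if i < head else lo + (i - head)
--             for i in range(0, head + tail, step)}
-- ===== Notes on version B (the rewrite author's own statement) =====
-- stated objective: alternative
-- what changed: B is two-phase: a parser reduces every accepted expression to a numeric descriptor (start, head, tail, step) and one generator emits the set via the index-to-value formula i -> start+i (wrapping to lo+(i-head) past head), whereas A builds concrete lists per branch, concatenates the circular halves and samples them by range stepping or slicing.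
-- outside the precondition, e.g. on calculate_range_from_expression('5-2/-1', (1, 12)): A returns {1, 2, 5, 6, 7, 8, 9, 10, 11, 12}, B returns set()
import Mathlib
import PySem

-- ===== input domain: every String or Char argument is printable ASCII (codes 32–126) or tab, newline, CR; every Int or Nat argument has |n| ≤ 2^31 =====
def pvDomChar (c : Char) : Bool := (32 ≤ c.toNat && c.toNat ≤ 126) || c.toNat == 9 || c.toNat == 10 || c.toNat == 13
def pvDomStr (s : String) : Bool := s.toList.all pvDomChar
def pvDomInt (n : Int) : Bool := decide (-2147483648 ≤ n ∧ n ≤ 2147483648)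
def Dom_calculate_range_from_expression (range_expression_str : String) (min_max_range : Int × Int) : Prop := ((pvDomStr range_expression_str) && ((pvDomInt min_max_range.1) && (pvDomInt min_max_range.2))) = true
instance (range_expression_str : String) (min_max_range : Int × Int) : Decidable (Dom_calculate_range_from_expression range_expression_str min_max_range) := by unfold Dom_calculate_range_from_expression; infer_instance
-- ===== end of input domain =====

-- B replaces A's per-branch list building, concatenation and slicing by a parse phase that yields
-- a numeric descriptor (start, head, tail, step) and ONE generator that maps indices to values by
-- the formula i ↦ start+i (wrapping to lo+(i-head) past head); equal return values on Pre_
-- (where Python raises, both ports return []).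

-- ===== PORT A =====
-- shared tail of A's '-'-subrange and '*'-subrange cases ("if prefix < suffix: ... else: round trip")
def pvA_finish (min_max_range : Int × Int) (pre suf offset : Int) : List Int :=
  if pre < suf then
    PySem.Set.ofList (PySem.List.pyRange pre (suf + 1) offset)
  else
    let round_trip := PySem.List.pyRange pre (min_max_range.2 + 1) 1 ++
                      PySem.List.pyRange min_max_range.1 (suf + 1) 1
    match PySem.List.slice? round_trip none none offset with
    | some l => PySem.Set.ofList l
    | none => []   -- slice step 0: ValueError

def calculate_range_from_expression (range_expression_str : String) (min_max_range : Int × Int) : List Int :=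
  let element := PySem.Str.strip range_expression_str
  if element = "*" then
    PySem.Set.ofList (PySem.List.pyRange min_max_range.1 (min_max_range.2 + 1) 1)
  else if PySem.Str.strIsdigit element = true then
    match PySem.Int.ofStr? element with
    | some value =>
      if min_max_range.1 ≤ value ∧ value ≤ min_max_range.2 then PySem.Set.ofList [value]
      else []   -- raise ValueError "... is not within valid range"
    | none => []
  else if PySem.Str.isIn "-" element = true ∨ PySem.Str.isIn "/" element = true then
    let divide := (PySem.Str.split? element "/").getD []
    let subrange := divide.getD 0 ""
    match (if divide.length = 2 then PySem.Int.ofStr? (divide.getD 1 "") else some 1) with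
    | some offset =>
      if PySem.Str.isIn "-" subrange = true then
        match ((PySem.Str.split? subrange "-").getD []).mapM PySem.Int.ofStr? with
        | some [pre, suf] =>
          if pre < min_max_range.1 ∨ suf > min_max_range.2 then []   -- raise ValueError
          else pvA_finish min_max_range pre suf offset
        | _ => []   -- int() ValueError, or unpacking ≠ 2 values
      else if PySem.Str.strIsdigit subrange = true then
        match PySem.Int.ofStr? subrange with
        | some v => PySem.Set.ofList (PySem.List.pyRange v (min_max_range.2 + 1) offset)
        | none => []
      else if subrange = "*" then
        pvA_finish min_max_range min_max_range.1 min_max_range.2 offset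
      else []   -- raise ValueError "Unrecognized symbol"
    | none => []   -- int(divide[1]) ValueError
  else []   -- raise ValueError "Element ... not in a recognized format."

-- ===== PORT B =====
-- _descriptor: normalize a (possibly circular) bound pair to (start, head, tail)
def pvB_desc (lo hi a b : Int) : Int × Int × Int :=
  if a < b then (a, b + 1 - a, 0)
  else (a, max 0 (hi + 1 - a), max 0 (b + 1 - lo))

-- _parse: expression → numeric descriptor (start, head, tail, step); none = ValueError
def pvB_parse (element : String) (lo hi : Int) : Option (Int × Int × Int × Int) :=
  if element = "*" then some (lo, max 0 (hi + 1 - lo), 0, 1)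
  else if PySem.Str.isIn "-" element = false ∧ PySem.Str.isIn "/" element = false then
    none   -- raise ValueError "Element ... not in a recognized format."
  else
    let parts := (PySem.Str.split? element "/").getD []
    match (if parts.length = 2 then PySem.Int.ofStr? (parts.getD 1 "") else some 1) with
    | none => none   -- int(parts[1]) ValueError
    | some step =>
      let sub := parts.getD 0 ""
      if PySem.Str.isIn "-" sub = true then
        match ((PySem.Str.split? sub "-").getD []).mapM PySem.Int.ofStr? with
        | none => none   -- int() ValueError
        | some l =>
          -- 'a, b = (int(n) for n in ...)': unpack succeeds only on exactly two values
          match l with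
          | [] => none
          | a :: t =>
            match t with
            | [] => none
            | b :: t2 =>
              match t2 with
              | _ :: _ => none
              | [] =>
                if a < lo ∨ b > hi then none   -- raise ValueError "... is not within valid range."
                else
                  let d := pvB_desc lo hi a b
                  some (d.1, d.2.1, d.2.2, step)
      else if PySem.Str.strIsdigit sub = true then
        match PySem.Int.ofStr? sub with
        | none => none
        | some v => some (v, max 0 (hi + 1 - v), 0, step)
      else if sub = "*" then
        let d := pvB_desc lo hi lo hi
        some (d.1, d.2.1, d.2.2, step)
      else none   -- raise ValueError "Unrecognized symbol"

-- generate phase: one set comprehension over indices, value by the wrap formula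
def pvB_generate (lo start head tail step : Int) : List Int :=
  PySem.Set.ofList ((PySem.List.pyRange 0 (head + tail) step).map
    (fun i => if i < head then start + i else lo + (i - head)))

def calculate_range_from_expression_alt (range_expression_str : String) (min_max_range : Int × Int) : List Int :=
  let lo := min_max_range.1
  let hi := min_max_range.2
  let element := PySem.Str.strip range_expression_str
  if PySem.Str.strIsdigit element = true then
    match PySem.Int.ofStr? element with
    | none => []
    | some value =>
      if lo ≤ value ∧ value ≤ hi then PySem.Set.ofList [value]
      else []   -- raise ValueError
  else
    match pvB_parse element lo hi with
    | none => []   -- _parse raised ValueError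
    | some (start, head, tail, step) => pvB_generate lo start head tail step

-- ===== PRECONDITION & SPEC =====
-- Pre_ admits exactly the inputs on which the Python A returns, EXCEPT that in the range/step
-- case it also requires the step to be positive: a step of 0 makes A raise, and on a negative
-- step A's values (empty, reverse-sampled or past-the-bound descending sets, depending on the
-- branch) are accidents of implementing the step with range() vs slicing — an unspecifiable
-- corner for a cron step, which is excluded.
def Pre_calculate_range_from_expression (range_expression_str : String) (min_max_range : Int × Int) : Prop :=
  let e := PySem.Str.strip range_expression_str
  (e = "*") ∨
  (PySem.Str.strIsdigit e = true ∧
     min_max_range.1 ≤ (PySem.Int.ofStr? e).getD 0 ∧ (PySem.Int.ofStr? e).getD 0 ≤ min_max_range.2) ∨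
  (¬ e = "*" ∧ PySem.Str.strIsdigit e = false ∧
   (PySem.Str.isIn "-" e = true ∨ PySem.Str.isIn "/" e = true) ∧
   (let parts := (PySem.Str.split? e "/").getD [];
    let offOpt := if parts.length = 2 then PySem.Int.ofStr? (parts.getD 1 "") else some 1;
    offOpt.isSome = true ∧ 1 ≤ offOpt.getD 0 ∧
    (let sub := parts.getD 0 "";
     (PySem.Str.isIn "-" sub = true ∧
        (let pq := ((PySem.Str.split? sub "-").getD []).mapM PySem.Int.ofStr?;
         pq.isSome = true ∧ (pq.getD []).length = 2 ∧
         min_max_range.1 ≤ (pq.getD []).getD 0 0 ∧ (pq.getD []).getD 1 0 ≤ min_max_range.2)) ∨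
     (PySem.Str.isIn "-" sub = false ∧ PySem.Str.strIsdigit sub = true) ∨
     (PySem.Str.isIn "-" sub = false ∧ sub = "*"))))
instance (range_expression_str : String) (min_max_range : Int × Int) : Decidable (Pre_calculate_range_from_expression range_expression_str min_max_range) := by unfold Pre_calculate_range_from_expression; infer_instance

def pvWitness_calculate_range_from_expression : String × (Int × Int) := ("1-9/2", (0, 10))

def Spec_calculate_range_from_expression (range_expression_str : String) (min_max_range : Int × Int) (out : List Int) : Prop := out = calculate_range_from_expression_alt range_expression_str min_max_range
instance (range_expression_str : String) (min_max_range : Int × Int) (out : List Int) : Decidable (Spec_calculate_range_from_expression range_expression_str min_max_range out) := by unfold Spec_calculate_range_from_expression; infer_instance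

-- ===== CLAIM (what is proved, stated in full; the proofs are below) =====
def Claim_equal_calculate_range_from_expression : Prop := ∀ (range_expression_str : String) (min_max_range : Int × Int), Dom_calculate_range_from_expression range_expression_str min_max_range → Pre_calculate_range_from_expression range_expression_str min_max_range → Spec_calculate_range_from_expression range_expression_str min_max_range (calculate_range_from_expression range_expression_str min_max_range)

-- ===== LEMMAS AND PROOFS =====

-- B's generator on a non-wrapping descriptor (tail = 0) is exactly range(a, b, st)
theorem pv_gen_linear (lo a b st head : Int) (h : 0 < st) (hh : head = max 0 (b - a)) :
    pvB_generate lo a head 0 st = PySem.Set.ofList (PySem.List.pyRange a b st) := by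
  subst hh
  unfold pvB_generate
  congr 1
  rw [add_zero, PySem.List.pyRange_of_pos 0 (max 0 (b - a)) h, PySem.List.pyRange_of_pos a b h,
    List.map_map]
  by_cases hab : a < b
  · have hmax : max 0 (b - a) = b - a := by omega
    rw [hmax, if_pos (by omega : (0:Int) < b - a), if_pos hab]
    simp only [sub_zero]
    apply List.map_congr_left
    intro k hk
    rw [List.mem_range] at hk
    have hk' : (k : Int) < (b - a + st - 1) / st := Int.lt_toNat.mp hk
    have hk2 : ((k : Int) + 1) * st ≤ b - a + st - 1 :=
      (Int.le_ediv_iff_mul_le h).mp (by omega)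
    have hlt : st * (k : Int) < b - a := by nlinarith
    have hnn : (0:Int) ≤ st * (k : Int) := by positivity
    simp only [Function.comp_apply, zero_add]
    rw [if_pos hlt]
  · have hmax : max 0 (b - a) = 0 := by omega
    rw [hmax]
    simp [hab]

-- xs[::st] for a positive step st, expanded
theorem pv_slice?_pos {α : Type} (xs : List α) (st : Int) (h : 0 < st) :
    PySem.List.slice? xs none none st =
      some (List.filterMap (fun (k : Nat) => xs[(st * (k : Int)).toNat]?)
        (List.range (if 0 < xs.length then (((xs.length : Int) + st - 1) / st).toNat else 0))) := by
  unfold PySem.List.slice? PySem.List.sliceIndices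
  rw [if_neg (by omega : ¬ st = 0)]
  simp only [if_neg (by omega : ¬ st < 0), if_pos h, zero_add, sub_zero]
  congr 2
  by_cases hl : 0 < xs.length
  · rw [if_pos (by exact_mod_cast hl), if_pos hl]
  · rw [if_neg (by exact_mod_cast hl), if_neg hl]

-- indexing A's concatenated round-trip list = B's wrap formula
theorem pv_wrap_get (lo hi a b i : Int) (h0 : 0 ≤ i)
    (hlt : i < max 0 (hi + 1 - a) + max 0 (b + 1 - lo)) :
    (PySem.List.pyRange a (hi + 1) 1 ++ PySem.List.pyRange lo (b + 1) 1)[i.toNat]? =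
      some (if i < max 0 (hi + 1 - a) then a + i else lo + (i - max 0 (hi + 1 - a))) := by
  have hlen1 : (PySem.List.pyRange a (hi + 1) 1).length = (hi + 1 - a).toNat :=
    PySem.List.length_pyRange_one _ _
  by_cases hc : i < max 0 (hi + 1 - a)
  · rw [if_pos hc, List.getElem?_append_left (by rw [hlen1]; omega)]
    rw [PySem.List.getElem?_pyRange_one, if_pos (by omega)]
    congr 1
    omega
  · rw [if_neg hc, List.getElem?_append_right (by rw [hlen1]; omega)]
    rw [hlen1, PySem.List.getElem?_pyRange_one, if_pos (by omega)]
    congr 1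
    omega

-- A's range-pair tail (direct range or concat+slice) = B's descriptor + generator
theorem pv_finish_eq (mm : Int × Int) (a b off : Int) (h : 1 ≤ off) :
    pvA_finish mm a b off =
      pvB_generate mm.1 (pvB_desc mm.1 mm.2 a b).1 (pvB_desc mm.1 mm.2 a b).2.1
        (pvB_desc mm.1 mm.2 a b).2.2 off := by
  unfold pvA_finish pvB_desc
  by_cases hab : a < b
  · rw [if_pos hab, if_pos hab]
    exact (pv_gen_linear mm.1 a (b + 1) off (b + 1 - a) (by omega) (by omega)).symm
  · rw [if_neg hab, if_neg hab]
    dsimp only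
    rw [pv_slice?_pos _ off (by omega)]
    dsimp only
    unfold pvB_generate
    congr 1
    have hlen : ((PySem.List.pyRange a (mm.2 + 1) 1 ++ PySem.List.pyRange mm.1 (b + 1) 1).length : Int) =
        max 0 (mm.2 + 1 - a) + max 0 (b + 1 - mm.1) := by
      simp [List.length_append, PySem.List.length_pyRange_one]
      omega
    rw [PySem.List.pyRange_of_pos 0 (max 0 (mm.2 + 1 - a) + max 0 (b + 1 - mm.1)) (by omega : (0:Int) < off),
      List.map_map]
    set L : Int := max 0 (mm.2 + 1 - a) + max 0 (b + 1 - mm.1) with hL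
    have hcnt : (if 0 < (PySem.List.pyRange a (mm.2 + 1) 1 ++ PySem.List.pyRange mm.1 (b + 1) 1).length
        then ((((PySem.List.pyRange a (mm.2 + 1) 1 ++ PySem.List.pyRange mm.1 (b + 1) 1).length : Int) + off - 1) / off).toNat
        else 0) = (if 0 < L then ((L - 0 + off - 1) / off).toNat else 0) := by
      by_cases hl : 0 < L
      · rw [if_pos (by omega), if_pos hl, hlen]
        norm_num
      · rw [if_neg (by omega), if_neg hl]
    rw [hcnt]
    by_cases hl : 0 < L
    · rw [if_pos hl]
      have hstep : ∀ k ∈ List.range ((L - 0 + off - 1) / off).toNat,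
          (fun (k : Nat) => (PySem.List.pyRange a (mm.2 + 1) 1 ++ PySem.List.pyRange mm.1 (b + 1) 1)[(off * (k : Int)).toNat]?) k =
            (some ∘ ((fun i => if i < max 0 (mm.2 + 1 - a) then a + i else mm.1 + (i - max 0 (mm.2 + 1 - a))) ∘ fun (k : Nat) => 0 + off * (k : Int))) k := by
        intro k hk
        rw [List.mem_range] at hk
        have hk' : (k : Int) < (L - 0 + off - 1) / off := Int.lt_toNat.mp hk
        have hk2 : ((k : Int) + 1) * off ≤ L - 0 + off - 1 :=
          (Int.le_ediv_iff_mul_le (by omega)).mp (by omega)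
        have hlt : off * (k : Int) < L := by nlinarith
        have hnn : (0:Int) ≤ off * (k : Int) := by positivity
        simp only [Function.comp_apply, zero_add]
        exact pv_wrap_get mm.1 mm.2 a b (off * (k : Int)) hnn (by omega)
      rw [List.filterMap_congr hstep, List.filterMap_eq_map]
    · rw [if_neg hl]
      rfl

-- ===== VERDICT (by name: the statement is the Claim_ definition above) =====
theorem calculate_range_from_expression_spec : Claim_equal_calculate_range_from_expression := by
  intro s mm _dom pre
  unfold Spec_calculate_range_from_expression
  unfold calculate_range_from_expression calculate_range_from_expression_alt pvB_parse
  dsimp only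
  unfold Pre_calculate_range_from_expression at pre
  simp only [] at pre
  by_cases h2 : PySem.Str.strIsdigit (PySem.Str.strip s) = true
  · have h1 : ¬ PySem.Str.strip s = "*" := by
      intro h; rw [h] at h2; exact absurd h2 (by decide)
    rw [if_neg h1, if_pos h2, if_pos h2]
    cases hv : PySem.Int.ofStr? (PySem.Str.strip s) with
    | none => rfl
    | some v => rfl
  · rw [if_neg h2, if_neg h2]
    by_cases h1 : PySem.Str.strip s = "*"
    · rw [if_pos h1, if_pos h1]
      dsimp only
      exact (pv_gen_linear mm.1 mm.1 (mm.2 + 1) 1 (max 0 (mm.2 + 1 - mm.1)) one_pos (by omega)).symm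
    · rw [if_neg h1, if_neg h1]
      by_cases h3 : PySem.Str.isIn "-" (PySem.Str.strip s) = true ∨ PySem.Str.isIn "/" (PySem.Str.strip s) = true
      · have h3' : ¬(PySem.Str.isIn "-" (PySem.Str.strip s) = false ∧ PySem.Str.isIn "/" (PySem.Str.strip s) = false) := by
          intro hc
          rcases h3 with h | h
          · rw [hc.1] at h; exact absurd h (by decide)
          · rw [hc.2] at h; exact absurd h (by decide)
        rw [if_pos h3, if_neg h3']
        rcases pre with p1 | p2 | ⟨-, -, -, hsome, hge, hrest⟩
        · exact absurd p1 h1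
        · exact absurd p2.1 h2
        generalize hoff : (if ((PySem.Str.split? (PySem.Str.strip s) "/").getD []).length = 2 then PySem.Int.ofStr? (((PySem.Str.split? (PySem.Str.strip s) "/").getD []).getD 1 "") else some 1) = offOpt
        rw [hoff] at hge hsome
        cases offOpt with
        | none => rfl
        | some off =>
          dsimp only
          simp only [Option.getD_some] at hge
          by_cases hd : PySem.Str.isIn "-" (((PySem.Str.split? (PySem.Str.strip s) "/").getD []).getD 0 "") = true
          · rw [if_pos hd, if_pos hd]
            generalize ((PySem.Str.split? (((PySem.Str.split? (PySem.Str.strip s) "/").getD []).getD 0 "") "-").getD []).mapM PySem.Int.ofStr? = pqOpt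
            cases pqOpt with
            | none => rfl
            | some l =>
              match l with
              | [] => rfl
              | [_] => rfl
              | p :: q :: _ :: _ => rfl
              | [p, q] =>
                dsimp only
                by_cases hbnd : p < mm.1 ∨ q > mm.2
                · rw [if_pos hbnd, if_pos hbnd]
                · rw [if_neg hbnd, if_neg hbnd]
                  exact pv_finish_eq mm p q off hge
          · rw [if_neg hd, if_neg hd]
            by_cases hg : PySem.Str.strIsdigit (((PySem.Str.split? (PySem.Str.strip s) "/").getD []).getD 0 "") = true
            · rw [if_pos hg, if_pos hg]
              cases PySem.Int.ofStr? (((PySem.Str.split? (PySem.Str.strip s) "/").getD []).getD 0 "") with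
              | none => rfl
              | some v =>
                dsimp only
                exact (pv_gen_linear mm.1 v (mm.2 + 1) off (max 0 (mm.2 + 1 - v)) (by omega) (by omega)).symm
            · rw [if_neg hg, if_neg hg]
              by_cases hs : (((PySem.Str.split? (PySem.Str.strip s) "/").getD []).getD 0 "") = "*"
              · rw [if_pos hs, if_pos hs]
                dsimp only
                exact pv_finish_eq mm mm.1 mm.2 off hge
              · rw [if_neg hs, if_neg hs]
      · have h3' : (PySem.Str.isIn "-" (PySem.Str.strip s) = false ∧ PySem.Str.isIn "/" (PySem.Str.strip s) = false) := by
          push Not at h3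
          exact ⟨Bool.eq_false_iff.mpr h3.1, Bool.eq_false_iff.mpr h3.2⟩
        rw [if_neg h3, if_pos h3']
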